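-- pv_equiv track=rewrite | github.com/Challenge-Next-Level/Floyd-Warshall | gunkim/tony의문제집/DataStructure2/17255_N으로만들기.py | check
-- ===== SOURCE A (Python) =====
-- def check(number):
--     if len(number) == 1: # 길이가 1이 되었다면 한 가지 경우 완성
--         return 1
--     flag = 0
--     for i in range(len(number) - 1): # 숫자가 하나의 수로 되어있는지 확인
--         if number[i] != number[i + 1]:
--             flag = 1
--             break
--     if flag == 1: # 서로 다른 수 라면 앞,뒤를 각각 뺀 경우로 check
--         return check(number[:-1]) + check(number[1:])
--     else: # 하나의 수로 되어있는 경우 한 가지 경우 밖에 되지 않음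
--         return 1
-- ===== SOURCE B (Python) =====
-- def check(number):
--     # Bottom-up DP over substring lengths instead of A's exponential recursion.
--     n = len(number)
--     if n <= 1:
--         return 1
--     prev = [1] * n  # prev[i] = ways for the length-1 substring starting at i
--     for length in range(2, n + 1):
--         prev = [1 if number[i:i + length] == number[i] * length
--                 else prev[i] + prev[i + 1]
--                 for i in range(n - length + 1)]
--     return prev[0]
-- ===== Notes on version B (the rewrite author's own statement) =====
-- stated objective: faster
-- what changed: Replaces the naive exponential end-peeling recursion with a bottom-up dynamic-programming table over substring lengths (each cell tests uniformity by a slice comparison).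
import Mathlib
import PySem

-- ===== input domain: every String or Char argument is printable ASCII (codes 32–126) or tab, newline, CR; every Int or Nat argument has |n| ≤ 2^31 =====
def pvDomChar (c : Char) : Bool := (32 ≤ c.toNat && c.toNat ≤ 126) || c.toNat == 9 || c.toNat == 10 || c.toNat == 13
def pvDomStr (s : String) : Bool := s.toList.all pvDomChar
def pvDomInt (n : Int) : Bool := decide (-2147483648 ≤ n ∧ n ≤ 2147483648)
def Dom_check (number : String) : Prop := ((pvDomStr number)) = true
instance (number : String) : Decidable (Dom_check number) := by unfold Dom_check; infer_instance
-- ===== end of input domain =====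

-- B replaces A's exponential end-peeling recursion by a bottom-up DP table over
-- substring lengths (objective: faster).

-- ===== PORT A =====
-- the 'for i in range(len(number)-1): if number[i] != number[i+1]: flag = 1; break'
-- loop: scans adjacent pairs, flag = 1 exactly when some adjacent pair differs
def pvDiffAdj : List Char → Bool
  | a :: b :: rest => if a ≠ b then true else pvDiffAdj (b :: rest)
  | _ => false

theorem pvDiffAdj_length {l : List Char} (h : pvDiffAdj l = true) : 2 ≤ l.length := by
  match l with
  | [] => simp [pvDiffAdj] at h
  | [a] => simp [pvDiffAdj] at h
  | a :: b :: rest => simp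

-- A's recursion on the string's character list; number[:-1] is dropLast and
-- number[1:] is tail (both exact for every Python string)
def pvCheckGo (l : List Char) : Int :=
  if l.length = 1 then 1
  else if h : pvDiffAdj l = true then
    pvCheckGo l.dropLast + pvCheckGo l.tail
  else 1
termination_by l.length
decreasing_by
  · have := pvDiffAdj_length h
    simp [List.length_dropLast]; omega
  · have := pvDiffAdj_length h
    simp [List.length_tail]; omega

def check (number : String) : Int := pvCheckGo number.toList

-- ===== PORT B =====
-- one DP cell: 'number[i:i+length] == number[i]*length', i.e. the slice
-- (take len of drop i) compared with the replicated character (exact: 0 ≤ i < n there)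
def pvCell (l : List Char) (prev : List Int) (len i : Nat) : Int :=
  if (l.drop i).take len = List.replicate len (l.getD i ' ') then 1
  else prev.getD i 0 + prev.getD (i + 1) 0

-- the 'for length in range(2, n+1)' loop; range(2, n+1) = List.range' 2 (n-1)
def check_alt (number : String) : Int :=
  let l := number.toList
  let n := l.length
  if n ≤ 1 then 1
  else
    ((List.range' 2 (n - 1)).foldl
      (fun prev len => (List.range (n - len + 1)).map (pvCell l prev len))
      (List.replicate n 1)).getD 0 0

-- ===== PRECONDITION & SPEC =====
def Spec_check (number : String) (out : Int) : Prop := out = check_alt number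
instance (number : String) (out : Int) : Decidable (Spec_check number out) := by unfold Spec_check; infer_instance

-- ===== CLAIM (what is proved, stated in full; the proofs are below) =====
def Claim_equal_check : Prop := ∀ (number : String), Dom_check number → Spec_check number (check number)

-- ===== LEMMAS AND PROOFS =====

-- 'no adjacent pair differs' means 'every later character equals the head'
theorem pvDiffAdj_false_cons (rest : List Char) (a : Char) :
    pvDiffAdj (a :: rest) = false ↔ ∀ c ∈ rest, c = a := by
  induction rest generalizing a with
  | nil => simp [pvDiffAdj]
  | cons b t ih =>
    by_cases hab : a = b
    · subst hab
      have he : pvDiffAdj (a :: a :: t) = pvDiffAdj (a :: t) := by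
        rw [pvDiffAdj]; simp
      rw [he, ih a]
      constructor
      · intro h c hc
        rcases List.mem_cons.1 hc with h1 | h1
        · simp [h1]
        · exact h c h1
      · intro h c hc
        exact h c (List.mem_cons_of_mem _ hc)
    · have he : pvDiffAdj (a :: b :: t) = true := by
        rw [pvDiffAdj]; simp [hab]
      rw [he]
      constructor
      · intro h; exact absurd h (by simp)
      · intro h
        exact absurd (h b (by simp)).symm hab

theorem uniform_iff (s : List Char) (c : Char) (h0 : s.head? = some c) :
    (pvDiffAdj s = false) ↔ s = List.replicate s.length c := by
  match s with
  | [] => simp at h0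
  | a :: t =>
    have hc : a = c := by simpa using h0
    subst hc
    rw [pvDiffAdj_false_cons, List.eq_replicate_iff]
    constructor
    · intro h
      refine ⟨rfl, ?_⟩
      intro b hb
      rcases List.mem_cons.1 hb with h1 | h1
      · exact h1
      · exact h b h1
    · intro ⟨_, h⟩ b hb
      exact h b (List.mem_cons_of_mem _ hb)

theorem getD_map_range {α : Type} [Inhabited α] (f : Nat → α) (m i : Nat) (d : α) (h : i < m) :
    ((List.range m).map f).getD i d = f i := by
  rw [List.getD_eq_getElem?_getD, List.getElem?_map, List.getElem?_range h]
  rfl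

theorem sub_take_length (l : List Char) (i L : Nat) (h : i + L ≤ l.length) :
    ((l.drop i).take L).length = L := by
  simp [List.length_take, List.length_drop]; omega

theorem take_dropLast (x : List Char) (L : Nat) (h : L ≤ x.length) :
    (x.take L).dropLast = x.take (L - 1) := by
  rw [List.dropLast_eq_take, List.take_take, List.length_take]
  congr 1
  omega

theorem getElem?_take' (l : List Char) (n m : Nat) :
    (l.take n)[m]? = if m < n then l[m]? else none := by
  induction n generalizing l m with
  | zero => simp
  | succ n ih =>
    match l with
    | [] => simp
    | a :: t =>
      match m with
      | 0 => simp
      | m + 1 =>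
        rw [List.take_succ_cons]
        simp only [List.getElem?_cons_succ]
        rw [ih t m]
        by_cases hm : m < n
        · rw [if_pos hm, if_pos (by omega)]
        · rw [if_neg hm, if_neg (by omega)]

theorem take_drop_tail (l : List Char) (i L : Nat) :
    ((l.drop i).take L).tail = (l.drop (i + 1)).take (L - 1) := by
  apply List.ext_getElem?
  intro j
  rw [List.getElem?_tail]
  rcases Nat.eq_zero_or_pos L with hL | hL
  · simp [hL]
  · rw [getElem?_take' _ _ _, getElem?_take' _ _ _]
    by_cases hj : j < L - 1
    · rw [if_pos (by omega), if_pos hj, List.getElem?_drop, List.getElem?_drop]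
      congr 1
      omega
    · rw [if_neg (by omega), if_neg hj]

theorem head?_take_drop (l : List Char) (i L : Nat) (hL : 0 < L) (hi : i < l.length) :
    ((l.drop i).take L).head? = some (l.getD i ' ') := by
  rw [List.head?_eq_getElem?, getElem?_take' _ _ _, if_pos hL, List.getElem?_drop,
    List.getD_eq_getElem?_getD]
  rw [Nat.add_zero, List.getElem?_eq_getElem hi]
  simp

-- the loop invariant: after the lengths 2..k+1 have been processed, entry i of the
-- table is A's answer on the length-(k+1) substring starting at i
theorem fold_inv (l : List Char) (k : Nat) (h : k + 1 ≤ l.length) :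
    (List.range' 2 k).foldl
      (fun prev len => (List.range (l.length - len + 1)).map (pvCell l prev len))
      (List.replicate l.length 1)
    = (List.range (l.length - (k + 1) + 1)).map
        (fun i => pvCheckGo ((l.drop i).take (k + 1))) := by
  induction k with
  | zero =>
    have hn : l.length - 1 + 1 = l.length := by omega
    rw [List.range'_zero, List.foldl_nil, hn]
    symm
    rw [List.eq_replicate_iff]
    refine ⟨by simp, ?_⟩
    intro b hb
    rcases List.mem_map.1 hb with ⟨i, hi, hb⟩
    have hi' : i < l.length := List.mem_range.1 hi
    rw [← hb, pvCheckGo]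
    rw [if_pos (sub_take_length l i 1 (by omega))]
  | succ k ih =>
    have h' : k + 1 ≤ l.length := by omega
    rw [List.range'_concat, List.foldl_append, List.foldl_cons, List.foldl_nil, ih h']
    simp only [Nat.one_mul, show 2 + k = k + 2 from by omega, show k + 1 + 1 = k + 2 from rfl]
    apply List.map_congr_left
    intro i hi
    have hi' : i + (k + 2) ≤ l.length := by
      have := List.mem_range.1 hi
      omega
    have hslen : ((l.drop i).take (k + 2)).length = k + 2 := sub_take_length l i (k + 2) hi'
    have hhead : ((l.drop i).take (k + 2)).head? = some (l.getD i ' ') :=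
      head?_take_drop l i (k + 2) (by omega) (by omega)
    have huni : (pvDiffAdj ((l.drop i).take (k + 2)) = false) ↔
        (l.drop i).take (k + 2) = List.replicate (k + 2) (l.getD i ' ') := by
      rw [uniform_iff _ _ hhead, hslen]
    have hd1 : ((l.drop i).take (k + 2)).dropLast = (l.drop i).take (k + 1) := by
      rw [take_dropLast _ _ (by simp [List.length_drop]; omega)]
      congr 1
    have hd2 : ((l.drop i).take (k + 2)).tail = (l.drop (i + 1)).take (k + 1) := by
      rw [take_drop_tail]
      congr 1
    rw [pvCheckGo, if_neg (by rw [hslen]; omega)]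
    by_cases hd : pvDiffAdj ((l.drop i).take (k + 2)) = true
    · have hne : ¬ ((l.drop i).take (k + 2) = List.replicate (k + 2) (l.getD i ' ')) := by
        intro hrep
        rw [huni.2 hrep] at hd
        simp at hd
      rw [dif_pos hd, hd1, hd2, pvCell, if_neg hne,
        getD_map_range _ _ _ _ (by omega), getD_map_range _ _ _ _ (by omega)]
    · have hf : pvDiffAdj ((l.drop i).take (k + 2)) = false := by
        revert hd
        cases pvDiffAdj ((l.drop i).take (k + 2)) <;> simp
      rw [dif_neg hd, pvCell, if_pos (huni.1 hf)]

-- ===== VERDICT (by name: the statement is the Claim_ definition above) =====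
theorem check_spec : Claim_equal_check := by
  intro number _
  unfold Spec_check check check_alt
  set l := number.toList with hl
  by_cases hn : l.length ≤ 1
  · rw [if_pos hn]
    match l, hn with
    | [], _ => rw [pvCheckGo]; simp [pvDiffAdj]
    | [a], _ => rw [pvCheckGo]; simp
  · rw [if_neg hn]
    have h2 : 2 ≤ l.length := by omega
    have hk : (l.length - 1) + 1 ≤ l.length := by omega
    rw [fold_inv l (l.length - 1) hk]
    have : l.length - 1 + 1 = l.length := by omega
    rw [this]
    have : l.length - l.length + 1 = 1 := by omega
    rw [this]
    rw [List.range_one, List.map_cons, List.map_nil, List.drop_zero, List.take_length]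
    rfl
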